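-- pv_equiv track=rewrite | github.com/indiaprince/Algorithms | 4948_acmicpc.py | Prime_func
-- ===== SOURCE A (Python) =====
-- def Prime_func(N):
--     Prime = []
--     start = N
--     end = 2*N
--     isPrime = [True for _ in range(end+1)]
--     for i in range(2,end+1):
--         if(not isPrime[i]): continue
--         if(N<i):
--             if(isPrime[i]) : Prime.append(i)
--
--         for  j in range(i*i,end+1,i):
--             isPrime[j] = False
--     return Prime
-- ===== SOURCE B (Python) =====
-- def is_prime(n):
--     if n < 2:
--         return False
--     if n % 2 == 0:
--         return n == 2
--     d = 3
--     while d * d <= n: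
--         if n % d == 0:
--             return False
--         d += 2
--     return True
--
--
-- def Prime_func(N):
--     out = []
--     for n in range(N + 1, 2 * N + 1):
--         if is_prime(n):
--             out.append(n)
--     return out
-- ===== Notes on version B (the rewrite author's own statement) =====
-- stated objective: simpler
-- what changed: Replaced the Eratosthenes sieve array over the whole interval from zero up to twice N with a direct scan of the candidate interval that decides each candidate by trial division (by two, then odd divisors up to its square root); no sieve array is allocated.
import Mathlib
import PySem

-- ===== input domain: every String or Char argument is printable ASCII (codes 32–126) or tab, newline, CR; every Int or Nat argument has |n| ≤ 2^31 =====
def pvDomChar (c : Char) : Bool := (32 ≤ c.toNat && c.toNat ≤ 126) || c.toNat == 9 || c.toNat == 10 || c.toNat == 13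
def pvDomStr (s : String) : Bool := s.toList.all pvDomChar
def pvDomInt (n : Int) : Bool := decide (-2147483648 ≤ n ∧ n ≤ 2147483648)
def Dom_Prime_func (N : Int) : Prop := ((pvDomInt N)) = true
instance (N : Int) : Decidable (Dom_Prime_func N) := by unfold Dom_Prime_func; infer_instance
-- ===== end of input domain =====

-- B replaces A's Eratosthenes sieve array over the whole interval with per-candidate
-- trial division over the candidate interval: simpler (no sieve array), not claimed faster.

-- ===== PORT A =====
-- inner loop 'for j in range(i*i, end+1, i): isPrime[j] = False'
-- (j is always ≥ 0 and < len(isPrime), so List.set at j.toNat is exact)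
def sieveMark (e : Int) (s : List Bool) (i : Int) : List Bool :=
  (PySem.List.pyRange (i*i) (e+1) i).foldl (fun t j => t.set j.toNat false) s

-- one iteration of the outer loop; the read isPrime[i] is always in range
-- (2 ≤ i ≤ e < len(isPrime)), so '.getD false' never supplies its default
def stepA (N e : Int) (st : List Int × List Bool) (i : Int) : List Int × List Bool :=
  if ((PySem.List.pyGet? st.2 i).getD false) = false then st
  else
    ((if N < i ∧ ((PySem.List.pyGet? st.2 i).getD false) = true then st.1 ++ [i] else st.1),
     sieveMark e st.2 i)

def Prime_func (N : Int) : List Int :=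
  let e := 2 * N
  let isPrime : List Bool := (PySem.List.pyRange 0 (e+1) 1).map (fun _ => true)
  ((PySem.List.pyRange 2 (e+1) 1).foldl (stepA N e) ([], isPrime)).1

-- ===== PORT B =====
-- 'while d*d <= n: if n % d == 0: return False; d += 2'
def tdLoop (n d : Int) : Bool :=
  if d * d ≤ n then
    if PySem.Int.mod n d = 0 then false else tdLoop n (d + 2)
  else true
termination_by (n + 1 - d).toNat
decreasing_by
  have hd : d ≤ n := by
    rcases (by omega : d ≤ 0 ∨ 0 < d) with hd0 | hd0
    · nlinarith [mul_self_nonneg d]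
    · nlinarith
  omega

def isPrimeTD (n : Int) : Bool :=
  if n < 2 then false
  else if PySem.Int.mod n 2 = 0 then n == 2
  else tdLoop n 3

def Prime_func_alt (N : Int) : List Int :=
  (PySem.List.pyRange (N+1) (2*N+1) 1).foldl
    (fun acc n => if isPrimeTD n then acc ++ [n] else acc) []

-- ===== PRECONDITION & SPEC =====
def Spec_Prime_func (N : Int) (out : List Int) : Prop := out = Prime_func_alt N
instance (N : Int) (out : List Int) : Decidable (Spec_Prime_func N out) := by unfold Spec_Prime_func; infer_instance

-- ===== CLAIM (what is proved, stated in full; the proofs are below) =====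
def Claim_equal_Prime_func : Prop := ∀ (N : Int), Dom_Prime_func N → Spec_Prime_func N (Prime_func N)

-- ===== LEMMAS AND PROOFS =====

-- n ≥ 2 is prime iff it has no prime factor p < n with p*p ≤ n (what the sieve tests)
lemma prime_iff_no_small_factor (n : Nat) (hn : 2 ≤ n) :
    Nat.Prime n ↔ ¬ ∃ p : Nat, Nat.Prime p ∧ p < n ∧ p ∣ n ∧ p * p ≤ n := by
  constructor
  · rintro hp ⟨p, hpp, hlt, hdvd, _⟩
    rcases (Nat.Prime.eq_one_or_self_of_dvd hp p hdvd) with h | h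
    · exact hpp.ne_one h
    · omega
  · intro h
    by_contra hnp
    refine h ⟨n.minFac, Nat.minFac_prime (by omega), ?_, Nat.minFac_dvd n, ?_⟩
    · have hne : n.minFac ≠ n := by
        intro he; exact hnp ((Nat.prime_def_minFac.mpr ⟨hn, he⟩))
      have := Nat.minFac_le (show 0 < n by omega)
      omega
    · have := Nat.minFac_sq_le_self (by omega) hnp
      rwa [sq] at this

-- trial-division loop: true iff no odd divisor m ≥ d with m*m ≤ n
lemma tdLoop_iff (n d : Int) (hd : 3 ≤ d) (hodd : d % 2 = 1) :
    tdLoop n d = true ↔ ∀ m : Int, d ≤ m → m * m ≤ n → m % 2 = 1 → ¬ m ∣ n := by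
  rw [tdLoop]
  split_ifs with hle hmod
  · constructor
    · intro h; exact absurd h (by simp)
    · intro h
      exact absurd (PySem.Int.mod_eq_zero_iff_dvd n d |>.mp hmod) (h d le_rfl hle hodd)
  · rw [tdLoop_iff n (d + 2) (by omega) (by omega)]
    constructor
    · intro h m hm hmm hmo hdvd
      rcases (by omega : m < d + 2 ∨ d + 2 ≤ m) with hlt | hge
      · have hm2 : m = d ∨ m = d + 1 := by omega
        rcases hm2 with rfl | rfl
        · exact hmod ((PySem.Int.mod_eq_zero_iff_dvd n m).mpr hdvd)
        · omega
      · exact h m hge hmm hmo hdvd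
    · intro h m hm hmm hmo hdvd
      exact h m (by omega) hmm hmo hdvd
  · constructor
    · intro _ m hm hmm hmo hdvd
      have : d * d ≤ m * m := by nlinarith
      omega
    · intro _; rfl
termination_by (n + 1 - d).toNat
decreasing_by
  have hdn : d ≤ n := by nlinarith
  omega

-- B's primality test agrees with Nat.Prime on n ≥ 2
lemma isPrimeTD_iff (n : Int) (h2 : 2 ≤ n) : isPrimeTD n = true ↔ Nat.Prime n.toNat := by
  unfold isPrimeTD
  rw [if_neg (by omega)]
  have hmod2 : PySem.Int.mod n 2 = n % 2 := PySem.Int.mod_eq_emod_of_pos (by omega)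
  by_cases hev : PySem.Int.mod n 2 = 0
  · rw [if_pos hev]
    have hdvd : (2:Int) ∣ n := (PySem.Int.mod_eq_zero_iff_dvd n 2).mp hev
    constructor
    · intro h
      have hn2 : n = 2 := by simpa using h
      subst hn2; decide
    · intro hp
      have h2d : 2 ∣ n.toNat := by
        apply Int.natCast_dvd_natCast.mp
        rw [Int.toNat_of_nonneg (by omega)]
        exact_mod_cast hdvd
      rcases hp.eq_one_or_self_of_dvd 2 h2d with h1 | hself
      · omega
      · have : n = 2 := by omega
        simp [this]
  · rw [if_neg hev]
    rw [hmod2] at hev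
    have hodd : n % 2 = 1 := by omega
    have h3 : 3 ≤ n := by omega
    rw [tdLoop_iff n 3 (by omega) (by decide)]
    constructor
    · intro h
      rw [prime_iff_no_small_factor n.toNat (by omega)]
      rintro ⟨p, hpp, hlt, hdvd, hsq⟩
      have hp2 : p ≠ 2 := by
        rintro rfl
        have : (2:Int) ∣ n := by
          have := Int.natCast_dvd_natCast.mpr hdvd
          rwa [Int.toNat_of_nonneg (by omega)] at this
        omega
      have hpodd : p % 2 = 1 := by
        rcases hpp.eq_two_or_odd with h | h
        · exact absurd h hp2
        · exact h
      have hp3 : 3 ≤ p := by have := hpp.two_le; omega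
      have hdvd' : (p:Int) ∣ n := by
        have := Int.natCast_dvd_natCast.mpr hdvd
        rwa [Int.toNat_of_nonneg (by omega)] at this
      have hsq' : (p:Int) * (p:Int) ≤ n := by
        have : ((p * p : Nat) : Int) ≤ ((n.toNat : Nat) : Int) := Nat.cast_le.mpr hsq
        push_cast at this
        rwa [Int.toNat_of_nonneg (by omega)] at this
      exact h (p:Int) (by exact_mod_cast hp3) hsq' (by omega) hdvd'
    · intro hp m hm hmm hmo hdvd
      have hmn : m.toNat ∣ n.toNat := by
        apply Int.natCast_dvd_natCast.mp
        rw [Int.toNat_of_nonneg (by omega), Int.toNat_of_nonneg (by omega)]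
        exact hdvd
      rcases hp.eq_one_or_self_of_dvd _ hmn with h1 | hself
      · omega
      · have hmn' : m = n := by omega
        nlinarith

-- marking fold: length preserved
lemma foldl_set_length (L : List Int) (s : List Bool) :
    (L.foldl (fun t j => t.set j.toNat false) s).length = s.length := by
  induction L generalizing s with
  | nil => rfl
  | cons j L ih => simp [List.foldl, ih]

-- marking fold: entry k is false exactly on the marked indices (all marks ≥ 0)
lemma foldl_set_getElem (L : List Int) (hL : ∀ j ∈ L, 0 ≤ j) (s : List Bool) (k : Nat)
    (hk : k < s.length) :
    (L.foldl (fun t j => t.set j.toNat false) s)[k]? =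
      if (k : Int) ∈ L then some false else s[k]? := by
  induction L generalizing s with
  | nil => simp
  | cons j L ih =>
    have hj0 : 0 ≤ j := hL j List.mem_cons_self
    have hrest : ∀ x ∈ L, 0 ≤ x := fun x hx => hL x (List.mem_cons_of_mem _ hx)
    have hk' : k < (s.set j.toNat false).length := by simpa using hk
    rw [List.foldl_cons, ih hrest _ hk', List.getElem?_set_of_lt false s hk]
    by_cases hmem : (k:Int) ∈ L
    · simp [hmem, List.mem_cons]
    · by_cases hjk : j.toNat = k
      · have hj : (k:Int) = j := by omega
        simp [hjk, hj, List.mem_cons]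
      · have hj : ¬ (k:Int) = j := by omega
        simp [hjk, hj, List.mem_cons]

-- sieve invariant after the outer loop has processed 2,…,i-1
def SieveInv (e i : Int) (s : List Bool) : Prop :=
  s.length = (e + 1).toNat ∧ ∀ k : Nat, k < (e + 1).toNat →
    (s[k]? = some false ↔ ∃ p : Nat, Nat.Prime p ∧ (p : Int) < i ∧ p ∣ k ∧ p * p ≤ k)

-- the sieve read at i decides primality of i
lemma read_iff_prime (e i : Int) (s : List Bool) (hinv : SieveInv e i s)
    (h2 : 2 ≤ i) (hie : i ≤ e) :
    ((PySem.List.pyGet? s i).getD false) = true ↔ Nat.Prime i.toNat := by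
  obtain ⟨hlen, hinv⟩ := hinv
  have hk : i.toNat < s.length := by omega
  have hget : PySem.List.pyGet? s i = s[i.toNat]? := PySem.List.pyGet?_of_nonneg _ (by omega)
  rw [hget, List.getElem?_eq_getElem hk]
  have hiff := hinv i.toNat (by omega)
  rw [List.getElem?_eq_getElem hk, Option.some_inj] at hiff
  simp only [Option.getD_some]
  rw [prime_iff_no_small_factor i.toNat (by omega)]
  constructor
  · intro ht
    rintro ⟨p, hpp, hlt, hdvd, hsq⟩
    have hf : s[i.toNat]'hk = false := hiff.mpr ⟨p, hpp, by omega, hdvd, hsq⟩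
    rw [ht] at hf; cases hf
  · intro hnp
    by_contra hne
    have hf : s[i.toNat]'hk = false := by
      revert hne; cases s[i.toNat]'hk <;> simp
    obtain ⟨p, hpp, hlt, hdvd, hsq⟩ := hiff.mp hf
    exact hnp ⟨p, hpp, by omega, hdvd, hsq⟩

lemma sieveMark_inv (e i : Int) (s : List Bool) (hinv : SieveInv e i s)
    (h2 : 2 ≤ i) (hp : Nat.Prime i.toNat) :
    SieveInv e (i + 1) (sieveMark e s i) := by
  obtain ⟨hlen, hinv⟩ := hinv
  have hii : (0:Int) < i * i := by positivity
  have hL : ∀ j ∈ PySem.List.pyRange (i*i) (e+1) i, 0 ≤ j := by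
    intro j hj
    have := ((PySem.List.mem_pyRange_iff_of_pos (by omega)) j).mp hj
    omega
  refine ⟨by rw [sieveMark, foldl_set_length]; exact hlen, ?_⟩
  intro k hk
  have hk' : k < s.length := by omega
  rw [sieveMark, foldl_set_getElem _ hL s k hk']
  have hmem : ((k:Int) ∈ PySem.List.pyRange (i*i) (e+1) i) ↔ (i ∣ (k:Int) ∧ i*i ≤ (k:Int)) := by
    rw [PySem.List.mem_pyRange_iff_of_pos (by omega)]
    constructor
    · rintro ⟨h1, h2', h3⟩
      exact ⟨(dvd_sub_left (dvd_mul_left i i)).mp h3, h1⟩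
    · rintro ⟨h1, h2'⟩
      exact ⟨h2', by omega, (dvd_sub_left (dvd_mul_left i i)).mpr h1⟩
  by_cases hm : (k:Int) ∈ PySem.List.pyRange (i*i) (e+1) i
  · rw [if_pos hm]
    obtain ⟨hdvd, hsq⟩ := hmem.mp hm
    simp only [true_iff]
    refine ⟨i.toNat, hp, by omega, ?_, ?_⟩
    · apply Int.natCast_dvd_natCast.mp
      rwa [Int.toNat_of_nonneg (by omega)]
    · have h1 : ((i.toNat * i.toNat : Nat) : Int) ≤ (k:Int) := by
        push_cast
        rwa [Int.toNat_of_nonneg (by omega)]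
      exact_mod_cast h1
  · rw [if_neg hm]
    rw [hinv k hk]
    constructor
    · rintro ⟨p, hpp, hlt, hdvd, hsq⟩
      exact ⟨p, hpp, by omega, hdvd, hsq⟩
    · rintro ⟨p, hpp, hlt, hdvd, hsq⟩
      rcases (by omega : (p:Int) < i ∨ (p:Int) = i) with hlt' | heq
      · exact ⟨p, hpp, hlt', hdvd, hsq⟩
      · exfalso
        apply hm
        rw [hmem]
        have hpk : i ∣ (k:Int) := by
          rw [← heq]; exact_mod_cast hdvd
        have hsk : i * i ≤ (k:Int) := by
          rw [← heq]; exact_mod_cast hsq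
        exact ⟨hpk, hsk⟩

lemma skip_inv (e i : Int) (s : List Bool) (hinv : SieveInv e i s)
    (h2 : 2 ≤ i) (hp : ¬ Nat.Prime i.toNat) :
    SieveInv e (i + 1) s := by
  obtain ⟨hlen, hinv⟩ := hinv
  refine ⟨hlen, ?_⟩
  intro k hk
  rw [hinv k hk]
  constructor
  · rintro ⟨p, hpp, hlt, hdvd, hsq⟩
    exact ⟨p, hpp, by omega, hdvd, hsq⟩
  · rintro ⟨p, hpp, hlt, hdvd, hsq⟩
    rcases (by omega : (p:Int) < i ∨ (p:Int) = i) with hlt' | heq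
    · exact ⟨p, hpp, hlt', hdvd, hsq⟩
    · exfalso; apply hp
      have : p = i.toNat := by omega
      rwa [← this]

-- outer loop: accumulates exactly the primes > N in [i, e]
lemma loopA (N e : Int) : ∀ (cnt : Nat) (i : Int) (acc : List Int) (s : List Bool),
    cnt = (e + 1 - i).toNat → 2 ≤ i → SieveInv e i s →
    ((PySem.List.pyRange i (e+1) 1).foldl (stepA N e) (acc, s)).1
      = acc ++ ((PySem.List.pyRange i (e+1) 1).filter
          (fun j => decide (N < j) && decide (Nat.Prime j.toNat))) := by
  intro cnt
  induction cnt with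
  | zero =>
    intro i acc s hcnt h2 hinv
    rw [PySem.List.pyRange_one_eq_nil (by omega)]
    simp
  | succ c ih =>
    intro i acc s hcnt h2 hinv
    have hi : i < e + 1 := by omega
    rw [PySem.List.pyRange_one_cons hi, List.foldl_cons, List.filter_cons]
    have hread := read_iff_prime e i s hinv h2 (by omega)
    by_cases hp : Nat.Prime i.toNat
    · have ht : ((PySem.List.pyGet? s i).getD false) = true := hread.mpr hp
      show ((PySem.List.pyRange (i+1) (e+1) 1).foldl (stepA N e) (stepA N e (acc, s) i)).1 = _
      rw [show stepA N e (acc, s) i =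
          ((if N < i then acc ++ [i] else acc), sieveMark e s i) by
        simp only [stepA, ht]
        rw [if_neg (by simp)]
        by_cases hN : N < i <;> simp [hN]]
      rw [ih (i+1) _ _ (by omega) (by omega) (sieveMark_inv e i s hinv h2 hp)]
      by_cases hN : N < i
      · simp [hN, hp]
      · simp [hN]
    · have hf : ((PySem.List.pyGet? s i).getD false) = false := by
        rcases Bool.eq_false_or_eq_true ((PySem.List.pyGet? s i).getD false) with h | h
        · exact absurd (hread.mp h) hp
        · exact h
      show ((PySem.List.pyRange (i+1) (e+1) 1).foldl (stepA N e) (stepA N e (acc, s) i)).1 = _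
      rw [show stepA N e (acc, s) i = (acc, s) by simp [stepA, hf]]
      rw [ih (i+1) _ _ (by omega) (by omega) (skip_inv e i s hinv h2 hp)]
      simp [hp]

-- the fresh sieve satisfies the invariant at i = 2
lemma init_inv (e : Int) :
    SieveInv e 2 ((PySem.List.pyRange 0 (e+1) 1).map (fun _ => true)) := by
  constructor
  · simp [PySem.List.length_pyRange_one]
  · intro k hk
    have hget : ((PySem.List.pyRange 0 (e+1) 1).map (fun _ => true))[k]? = some true := by
      rw [List.getElem?_map]
      have : (PySem.List.pyRange 0 (e+1) 1)[k]? = some ((0:Int) + k) := by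
        simp [hk]
      rw [this]; rfl
    rw [hget]
    simp only [Option.some_inj]
    constructor
    · intro h; cases h
    · rintro ⟨p, hpp, hlt, _, _⟩
      have := hpp.two_le
      omega

-- A computes the primes > N among 2,…,2N
lemma primeFunc_eq_filter (N : Int) :
    Prime_func N = (PySem.List.pyRange 2 (2*N+1) 1).filter
      (fun j => decide (N < j) && decide (Nat.Prime j.toNat)) := by
  show ((PySem.List.pyRange 2 (2*N+1) 1).foldl (stepA N (2*N)) ([], _)).1 = _
  rw [loopA N (2*N) ((2*N+1-2).toNat) 2 [] _ rfl (by omega) (init_inv (2*N))]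
  simp

-- B computes the primes in N+1,…,2N
lemma primeFuncAlt_eq_filter (N : Int) :
    Prime_func_alt N = (PySem.List.pyRange (N+1) (2*N+1) 1).filter
      (fun j => decide (Nat.Prime j.toNat)) := by
  show (PySem.List.pyRange (N+1) (2*N+1) 1).foldl _ [] = _
  rw [PySem.List.foldl_append_if_eq_filter]
  rw [List.nil_append]
  apply List.filter_congr
  intro j hj
  have hmem := PySem.List.mem_pyRange_one.mp hj
  have h2 : 2 ≤ j := by omega
  rw [Bool.eq_iff_iff]
  simp [isPrimeTD_iff j h2]

-- ===== VERDICT (by name: the statement is the Claim_ definition above) =====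
theorem Prime_func_spec : Claim_equal_Prime_func := by
  intro N _
  unfold Spec_Prime_func
  rw [primeFunc_eq_filter, primeFuncAlt_eq_filter]
  by_cases hN : 1 ≤ N
  · rw [PySem.List.pyRange_one_append 2 (N+1) (2*N+1) (by omega) (by omega), List.filter_append]
    have h1 : (PySem.List.pyRange 2 (N+1) 1).filter
        (fun j => decide (N < j) && decide (Nat.Prime j.toNat)) = [] := by
      apply List.filter_eq_nil_iff.mpr
      intro j hj
      have := PySem.List.mem_pyRange_one.mp hj
      simp [show ¬ N < j by omega]
    rw [h1, List.nil_append]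
    apply List.filter_congr
    intro j hj
    have := PySem.List.mem_pyRange_one.mp hj
    simp [show N < j by omega]
  · rw [PySem.List.pyRange_one_eq_nil (by omega), PySem.List.pyRange_one_eq_nil (by omega)]
    simp
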